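-- pv_equiv track=rewrite | github.com/jasonelliots/Sprint-Challenge--Algorithms | practice.py | func
-- ===== SOURCE A (Python) =====
-- def func(n):
--     sum = 0
--     for i in range(n):
--       j = 1
--       while j < n:
--         j *= 2
--         sum += 1
--
--     return sum
-- ===== SOURCE B (Python) =====
-- def func(n):
--     return n * (n - 1).bit_length() if n >= 1 else 0
-- ===== Notes on version B (the rewrite author's own statement) =====
-- stated objective: faster
-- what changed: Replaced the n iterations of a doubling while-loop by the closed form n * (n-1).bit_length() (0 for n < 1).
import Mathlib
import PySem

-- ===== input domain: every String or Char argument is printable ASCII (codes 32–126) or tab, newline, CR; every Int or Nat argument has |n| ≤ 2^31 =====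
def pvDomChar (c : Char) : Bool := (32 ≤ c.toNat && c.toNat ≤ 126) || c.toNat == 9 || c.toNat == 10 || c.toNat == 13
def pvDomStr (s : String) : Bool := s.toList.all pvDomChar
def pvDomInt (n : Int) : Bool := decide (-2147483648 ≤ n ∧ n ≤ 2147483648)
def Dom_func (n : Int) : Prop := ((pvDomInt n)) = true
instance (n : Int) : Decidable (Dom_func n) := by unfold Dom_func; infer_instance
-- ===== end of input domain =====

-- B replaces A's n repetitions of a doubling while-loop by the closed form
-- n * (n-1).bit_length() for n ≥ 1, else 0 (O(1) instead of O(n log n)).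

-- ===== PORT A =====
-- the inner `while j < n: j *= 2; sum += 1` loop; j stays positive (starts at 1),
-- which is what makes the loop terminate
def funcWhile (n j sum : Int) (hj : 0 < j) : Int :=
  if h : j < n then funcWhile n (j * 2) (sum + 1) (by omega) else sum
termination_by (n - j).toNat
decreasing_by omega

def func (n : Int) : Int :=
  (PySem.List.pyRange 0 n 1).foldl (fun sum _ => funcWhile n 1 sum (by norm_num)) 0

-- ===== PORT B =====
-- (n-1).bit_length() for n ≥ 1 is Nat.size of (n-1).toNat
def func_alt (n : Int) : Int :=
  if 1 ≤ n then n * (Nat.size (n - 1).toNat : Int) else 0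

-- ===== PRECONDITION & SPEC =====
def Spec_func (n : Int) (out : Int) : Prop := out = func_alt n
instance (n : Int) (out : Int) : Decidable (Spec_func n out) := by unfold Spec_func; infer_instance

-- ===== CLAIM (what is proved, stated in full; the proofs are below) =====
def Claim_equal_func : Prop := ∀ (n : Int), Dom_func n → Spec_func n (func n)

-- ===== LEMMAS AND PROOFS =====

theorem funcWhile_diff (n : Int) : ∀ (j _s : Int) (hj : 0 < j) (s₁ s₂ : Int),
    funcWhile n j s₁ hj - s₁ = funcWhile n j s₂ hj - s₂ := by
  intro j _s hj
  induction j, _s, hj using funcWhile.induct (n := n) with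
  | case1 j s hj h ih =>
    intro s₁ s₂
    rw [funcWhile]
    conv_rhs => rw [funcWhile]
    simp only [h, dif_pos]
    have := ih (s₁ + 1) (s₂ + 1)
    omega
  | case2 j s hj h =>
    intro s₁ s₂
    rw [funcWhile]
    conv_rhs => rw [funcWhile]
    simp only [h, dif_neg, not_false_iff]
    omega

theorem funcWhile_shift (n j : Int) (hj : 0 < j) (s : Int) :
    funcWhile n j s hj = s + funcWhile n j 0 hj := by
  have := funcWhile_diff n j s hj s 0
  omega

theorem funcWhile_ge (n : Int) : ∀ (j s : Int) (hj : 0 < j), s ≤ funcWhile n j s hj := by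
  intro j s hj
  induction j, s, hj using funcWhile.induct (n := n) with
  | case1 j s hj h ih =>
    rw [funcWhile]
    simp only [h, dif_pos]
    omega
  | case2 j s hj h =>
    rw [funcWhile]
    simp only [h, dif_neg, not_false_iff]
    omega

theorem funcWhile_nonneg (n j : Int) (hj : 0 < j) : 0 ≤ funcWhile n j 0 hj :=
  funcWhile_ge n j 0 hj

theorem funcWhile_le_iff (n : Int) (k : Nat) : ∀ (j : Int) (hj : 0 < j),
    funcWhile n j 0 hj ≤ (k : Int) ↔ n ≤ j * 2 ^ k := by
  induction k with
  | zero =>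
    intro j hj
    rw [funcWhile]
    split
    · rename_i h
      rw [funcWhile_shift]
      have := funcWhile_nonneg n (j * 2) (by omega)
      simp only [pow_zero, mul_one]
      omega
    · simp only [pow_zero, mul_one]; omega
  | succ k ih =>
    intro j hj
    rw [funcWhile]
    split
    · rename_i h
      rw [funcWhile_shift]
      have h2 := ih (j * 2) (by omega)
      constructor
      · intro hle
        have : funcWhile n (j * 2) 0 (by omega) ≤ (k : Int) := by push_cast at hle ⊢; omega
        have := h2.mp this
        calc n ≤ j * 2 * 2 ^ k := this
          _ = j * 2 ^ (k + 1) := by ring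
      · intro hn
        have : n ≤ j * 2 * 2 ^ k := by
          calc n ≤ j * 2 ^ (k + 1) := hn
            _ = j * 2 * 2 ^ k := by ring
        have := h2.mpr this
        push_cast
        omega
    · rename_i h
      have : n ≤ j * 2 ^ (k + 1) := by
        have h1 : (1 : Int) ≤ 2 ^ (k + 1) := one_le_pow₀ (by norm_num)
        nlinarith
      simp [this]
      positivity

theorem funcWhile_eq_size (n : Int) (hj : (0:Int) < 1) :
    funcWhile n 1 0 hj = (Nat.size (n - 1).toNat : Int) := by
  have key : ∀ k : Nat, funcWhile n 1 0 hj ≤ (k : Int) ↔ Nat.size (n - 1).toNat ≤ k := by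
    intro k
    rw [funcWhile_le_iff, Nat.size_le]
    have h2 : (0:Int) < 2 ^ k := by positivity
    have h2' : ((2:Int) ^ k) = ((2 ^ k : Nat) : Int) := by push_cast; ring
    constructor
    · intro h
      have : (n - 1).toNat < ((2 ^ k : Nat)) := by omega
      exact this
    · intro h
      have : ((n - 1).toNat : Int) < ((2 ^ k : Nat) : Int) := by exact_mod_cast h
      omega
  have hnn := funcWhile_nonneg n 1 hj
  have h1 : funcWhile n 1 0 hj ≤ (Nat.size (n - 1).toNat : Int) := (key _).mpr le_rfl
  have h2 : (Nat.size (n - 1).toNat : Int) ≤ funcWhile n 1 0 hj := by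
    have := (key (funcWhile n 1 0 hj).toNat).mp (by omega)
    omega
  omega

theorem foldl_funcWhile (n : Int) (l : List Int) (s : Int) :
    l.foldl (fun sum _ => funcWhile n 1 sum (by norm_num)) s
      = s + l.length * funcWhile n 1 0 (by norm_num) := by
  induction l generalizing s with
  | nil => simp
  | cons x xs ih =>
    simp only [List.foldl_cons, List.length_cons]
    rw [ih, funcWhile_shift]
    push_cast
    ring

-- ===== VERDICT (by name: the statement is the Claim_ definition above) =====
theorem func_spec : Claim_equal_func := by
  intro n _
  show func n = func_alt n
  unfold func func_alt
  rw [foldl_funcWhile, funcWhile_eq_size, PySem.List.length_pyRange_one]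
  by_cases h : 1 ≤ n
  · have : ((n - 0).toNat : Int) = n := by omega
    rw [if_pos h, this]
    ring
  · rw [if_neg h]
    have h0 : n.toNat = 0 := by omega
    have h1 : (n - 1).toNat = 0 := by omega
    simp [h0, h1]
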